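/-
  ONE MORE RULE OF THE NORMAL FORM OF A STATE: a store overwritten by a store of the same size at the same address disappears.

      Mem.writeLE_writeLE_same     (f.writeLE a n x).writeLE a n y = f.writeLE a n y   (the model's, X86/Derived/User/Mem.lean)
      Mem.writeLE<k>_writeLE<k>    the same at the sizes 1, 2, 4, 8, 16 of the image's stores, no side condition  (in the stepping set)

  WHY. Every `call` pushes its return address at `rsp - 8`. In sanitized code two check calls often follow each other with no
  store in between (`call __asan_load4_noabort; mov …; lea …; call __asan_load4_noabort`): without this rule the memory term
  of a walk grows by one layer per call, with it only by one per call that is separated from the last by another store.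
  (Stores at DIFFERENT addresses are not reordered: that needs disjointness facts — the walker's business.)
-/
import UserX.Step
namespace X86
namespace User
namespace Mem

/- `Mem.read_writeLE_in` (byte `i` of a stored range is the `i`-th byte of the number stored) and `Mem.writeLE_writeLE_same`
(a store overwritten at the same address and size) are the model's (X86/Derived/User/Mem.lean). -/

/-- The rule at the sizes of the image's stores, without a side condition: in the stepping set. -/
@[u_step] theorem writeLE1_writeLE1 (f : Mem) (a : Word) (x y : Nat) : (f.writeLE a 1 x).writeLE a 1 y = f.writeLE a 1 y :=
  writeLE_writeLE_same f a 1 x y (by decide)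
@[u_step] theorem writeLE2_writeLE2 (f : Mem) (a : Word) (x y : Nat) : (f.writeLE a 2 x).writeLE a 2 y = f.writeLE a 2 y :=
  writeLE_writeLE_same f a 2 x y (by decide)
@[u_step] theorem writeLE4_writeLE4 (f : Mem) (a : Word) (x y : Nat) : (f.writeLE a 4 x).writeLE a 4 y = f.writeLE a 4 y :=
  writeLE_writeLE_same f a 4 x y (by decide)
@[u_step] theorem writeLE8_writeLE8 (f : Mem) (a : Word) (x y : Nat) : (f.writeLE a 8 x).writeLE a 8 y = f.writeLE a 8 y :=
  writeLE_writeLE_same f a 8 x y (by decide)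
@[u_step] theorem writeLE16_writeLE16 (f : Mem) (a : Word) (x y : Nat) :
    (f.writeLE a 16 x).writeLE a 16 y = f.writeLE a 16 y :=
  writeLE_writeLE_same f a 16 x y (by decide)

end Mem
end User
end X86
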